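-- pv_equiv track=rewrite | github.com/PaddlePaddle/Paddle-bot | webservice/utils/LogProcess.py | find_key_word_index
-- ===== SOURCE A (Python) =====
-- def find_key_word_index(log_arr, key_word):
--     log_length = len(log_arr)
--     # 防止越界
--     index = max(0, log_length - 1)
--     find = False
--     for i in range(log_length - 1, -1, -1):
--         if log_arr[i].find(key_word) != -1:
--             index = i
--             find = True
--             break
--     return index, find
-- ===== SOURCE B (Python) =====
-- def find_key_word_index(log_arr, key_word):
--     hits = [i for i, line in enumerate(log_arr) if line.find(key_word) != -1]
--     if hits:
--         return hits[-1], True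
--     return max(0, len(log_arr) - 1), False
-- ===== Notes on version B (the rewrite author's own statement) =====
-- stated objective: alternative
-- what changed: Replaced the backward index loop with early break by a single forward pass that collects all matching indices via enumerate and returns the last one (or the default for no match).
import Mathlib
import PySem

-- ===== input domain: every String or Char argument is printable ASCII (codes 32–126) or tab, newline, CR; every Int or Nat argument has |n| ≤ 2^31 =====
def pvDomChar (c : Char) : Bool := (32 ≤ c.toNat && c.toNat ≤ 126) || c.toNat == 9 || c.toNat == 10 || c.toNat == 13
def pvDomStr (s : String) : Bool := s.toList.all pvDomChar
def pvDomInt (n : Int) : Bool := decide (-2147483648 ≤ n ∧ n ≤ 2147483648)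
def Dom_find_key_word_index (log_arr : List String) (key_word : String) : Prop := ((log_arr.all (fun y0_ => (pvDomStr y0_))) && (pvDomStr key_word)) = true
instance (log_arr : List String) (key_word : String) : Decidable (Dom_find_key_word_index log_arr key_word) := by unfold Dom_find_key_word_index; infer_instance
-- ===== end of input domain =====

-- B does one forward pass collecting every matching index and picks the last, instead of A's
-- backward scan with early break; same cost, different decomposition (objective: alternative).

-- ===== PORT A =====
-- the 'for i in range(log_length-1, -1, -1): … break' loop, carrying (index, find) and breaking on a hit
def findA_loop (log_arr : List String) (key_word : String) : List Int → Int × Bool → Int × Bool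
  | [], st => st
  | i :: rest, st =>
      if PySem.Str.find (PySem.List.pyGetD log_arr i "") key_word ≠ -1 then (i, true)
      else findA_loop log_arr key_word rest st

def find_key_word_index (log_arr : List String) (key_word : String) : Int × Bool :=
  let log_length : Int := PySem.List.len log_arr
  let index : Int := max 0 (log_length - 1)
  let find : Bool := false
  findA_loop log_arr key_word (PySem.List.pyRange (log_length - 1) (-1) (-1)) (index, find)

-- ===== PORT B =====
def find_key_word_index_alt (log_arr : List String) (key_word : String) : Int × Bool :=
  let hits : List Int := (PySem.List.enumerate log_arr 0).filterMap
    (fun p => if PySem.Str.find p.2 key_word ≠ -1 then some p.1 else none)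
  match PySem.List.pyGet? hits (-1) with      -- 'if hits: return hits[-1], True'
  | some i => (i, true)
  | none => (max 0 (PySem.List.len log_arr - 1), false)

-- ===== PRECONDITION & SPEC =====
def Spec_find_key_word_index (log_arr : List String) (key_word : String) (out : Int × Bool) : Prop := out = find_key_word_index_alt log_arr key_word
instance (log_arr : List String) (key_word : String) (out : Int × Bool) : Decidable (Spec_find_key_word_index log_arr key_word out) := by unfold Spec_find_key_word_index; infer_instance

-- ===== CLAIM (what is proved, stated in full; the proofs are below) =====
def Claim_equal_find_key_word_index : Prop := ∀ (log_arr : List String) (key_word : String), Dom_find_key_word_index log_arr key_word → Spec_find_key_word_index log_arr key_word (find_key_word_index log_arr key_word)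

-- ===== LEMMAS AND PROOFS =====

-- xs[-1] is the last element
theorem pyGet?_neg_one {α : Type} (xs : List α) : PySem.List.pyGet? xs (-1) = xs.getLast? := by
  cases xs with
  | nil => simp [PySem.List.pyGet?, PySem.List.pyIdx?]
  | cons x xs =>
      simp [PySem.List.pyGet?, PySem.List.pyIdx?, List.getLast?_eq_getElem?]

-- the hit list of B
def hitsOf (log_arr : List String) (key_word : String) : List Int :=
  (PySem.List.enumerate log_arr 0).filterMap
    (fun p => if PySem.Str.find p.2 key_word ≠ -1 then some p.1 else none)

theorem findA_loop_irrel (ys : List String) (x : String) (key_word : String)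
    (l : List Int) (st : Int × Bool) (h : ∀ i ∈ l, 0 ≤ i ∧ i < (ys.length : Int)) :
    findA_loop (ys ++ [x]) key_word l st = findA_loop ys key_word l st := by
  induction l with
  | nil => rfl
  | cons i rest ih =>
      have hi := h i (by simp)
      have hget : PySem.List.pyGetD (ys ++ [x]) i "" = PySem.List.pyGetD ys i "" := by
        rw [PySem.List.pyGetD_eq_getElem (ys ++ [x]) "" hi.1 (by simp; omega),
            PySem.List.pyGetD_eq_getElem ys "" hi.1 (by simpa using hi.2)]
        rw [List.getElem_append_left (by omega)]
      simp only [findA_loop, hget]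
      split
      · rfl
      · exact ih (fun j hj => h j (by simp [hj]))

-- generalized enumerate-start version of hitsOf for the append step
theorem hits_append (ys : List String) (x : String) (key_word : String) :
    hitsOf (ys ++ [x]) key_word
      = hitsOf ys key_word
        ++ (if PySem.Str.find x key_word ≠ -1 then [((ys.length : Int))] else []) := by
  unfold hitsOf
  rw [PySem.List.enumerate_append, List.filterMap_append]
  congr 1
  by_cases hx : PySem.Chars.find x.toList key_word.toList = -1 <;>
    simp [PySem.List.enumerate_cons, PySem.List.enumerate_nil, hx]

theorem main_lemma (key_word : String) (ys : List String) :
    ∀ st : Int × Bool,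
      findA_loop ys key_word (PySem.List.pyRange ((ys.length : Int) - 1) (-1) (-1)) st
        = match (hitsOf ys key_word).getLast? with
          | some i => (i, true)
          | none => st := by
  induction ys using List.reverseRecOn with
  | nil =>
      intro st
      rw [PySem.List.pyRange_neg_one_eq_nil (by norm_num)]
      simp [hitsOf, PySem.List.enumerate_nil, findA_loop]
  | append_singleton ys x ih =>
      intro st
      have hn : ((ys ++ [x]).length : Int) - 1 = (ys.length : Int) := by simp
      rw [hn, PySem.List.pyRange_neg_one_cons (by omega)]
      have hget : PySem.List.pyGetD (ys ++ [x]) (ys.length : Int) "" = x := by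
        rw [PySem.List.pyGetD_eq_getElem (ys ++ [x]) "" (by omega) (by simp)]
        simp
      simp only [findA_loop, hget]
      rw [hits_append]
      by_cases hx : PySem.Chars.find x.toList key_word.toList = -1
      · simp only [PySem.Str.find_eq, hx, ne_eq, not_true_eq_false, ite_false, List.append_nil]
        rw [findA_loop_irrel ys x key_word _ st
            (fun i hi => by
              have := (PySem.List.mem_pyRange_neg_one).mp hi
              constructor <;> omega)]
        · exact ih st
      · simp [hx]

-- ===== VERDICT (by name: the statement is the Claim_ definition above) =====
theorem find_key_word_index_spec : Claim_equal_find_key_word_index := by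
  intro log_arr key_word _
  unfold Spec_find_key_word_index find_key_word_index find_key_word_index_alt
  simp only [pyGet?_neg_one, PySem.List.len_eq]
  exact main_lemma key_word log_arr (max 0 ((log_arr.length : Int) - 1), false)
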